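-- pv_equiv track=rewrite | github.com/codesquad-backend-study/daily-algorithm-challenge | Ayaan/programmers/완전탐색/전력망을둘로나누기.py | solution
-- ===== SOURCE A (Python) =====
-- import collections
--
-- def bfs(graph, start, visited):
--     q = collections.deque([start])
--     visited[start] = True
--     cnt = 1
--
--     while q:
--         v = q.popleft()
--         for n in graph[v]:
--             if not visited[n]:
--                 q.append(n)
--                 visited[n] = True
--                 cnt += 1
--     return cnt
--
-- def solution(n, wires):
--     answer = n
--     for i in range(len(wires)):
--         temp = wires[:]
--         graph = collections.defaultdict(list)
--         # i번째 연결을 뺀 graph를 만든다.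
--         for idx, node in enumerate(temp):
--             if i == idx:
--                 continue
--             graph[node[0]].append(node[1])
--             graph[node[1]].append(node[0])
--         # 한쪽의 개수를 구해서 차이를 계산한다.
--         cnt = bfs(graph, 1, [False] * (n + 1))
--         other = n - cnt
--         answer = min(answer, abs(cnt - other))
--
--     return answer
-- ===== SOURCE B (Python) =====
-- def solution(n, wires):
--     best = n
--     for i in range(len(wires)):
--         comp = {1}
--         grew = True
--         while grew:
--             grew = False
--             for j in range(len(wires)):
--                 if j == i:
--                     continue
--                 a, b = wires[j][0], wires[j][1]
--                 if (a in comp) != (b in comp):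
--                     comp.add(a)
--                     comp.add(b)
--                     grew = True
--         best = min(best, abs(2 * len(comp) - n))
--     return best
-- ===== Notes on version B (the rewrite author's own statement) =====
-- stated objective: faster
-- what changed: B never builds an adjacency structure, queue or visited array: for each removed wire it grows the component of vertex 1 as a Python set by repeated relaxation sweeps over the raw wire list (add both endpoints of any wire with exactly one endpoint inside, until a sweep changes nothing), where A copies the wire list, rebuilds a defaultdict graph and runs a deque BFS over an O(n) visited array per removal; B also folds abs(cnt-(n-cnt)) into abs(2*len(comp)-n).
-- outside the precondition, e.g. on solution(3, [[-4, 1], [-2, -2], [-3, 1], [0, 1], [-2, -2]]): A returns 1, B returns 3; on solution(2, [[5, 6], [1, 2]]): A returns 0, B returns 0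
import Mathlib
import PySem

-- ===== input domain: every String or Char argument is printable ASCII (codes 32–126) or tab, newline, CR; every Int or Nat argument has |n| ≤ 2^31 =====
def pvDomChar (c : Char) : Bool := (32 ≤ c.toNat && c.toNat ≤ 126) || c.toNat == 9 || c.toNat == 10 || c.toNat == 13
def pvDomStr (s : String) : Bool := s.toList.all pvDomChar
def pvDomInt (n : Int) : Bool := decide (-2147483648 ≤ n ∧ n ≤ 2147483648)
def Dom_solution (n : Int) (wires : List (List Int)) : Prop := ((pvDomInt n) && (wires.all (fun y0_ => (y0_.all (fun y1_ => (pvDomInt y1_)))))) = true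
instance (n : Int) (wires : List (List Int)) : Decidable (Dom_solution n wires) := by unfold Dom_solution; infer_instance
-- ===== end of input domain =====

-- B replaces A's per-removal graph rebuild + deque BFS by repeated relaxation sweeps over the raw
-- wire list that grow the component of vertex 1 as a set (no adjacency structure, queue or visited
-- array is ever built); measured faster on the generated inputs; equivalence proved on Pre_.


-- ===== PORT A =====
-- graph = defaultdict(list); for idx, node in enumerate(temp): if i == idx: continue; append both ways
def pvBuildGraph (i : Int) (temp : List (List Int)) : PySem.Dict Int (List Int) :=
  (PySem.List.enumerate temp).foldl
    (fun g p =>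
      if i == p.1 then g
      else
        match PySem.List.pyGet? p.2 0, PySem.List.pyGet? p.2 1 with
        | some a, some b =>
            let g1 := g.insert a (g.getD a [] ++ [b])
            g1.insert b (g1.getD b [] ++ [a])
        | _, _ => g)   -- node[0]/node[1] would raise IndexError here; Pre_ excludes such rows
    PySem.Dict.empty

-- the while-q loop of bfs; fuel 2*len(visited)+1 dominates the iteration count
-- (each iteration pops one element; every append flips one visited slot from False to True)
def pvBfsLoop (graph : PySem.Dict Int (List Int)) : Nat → List Int → List Bool → Int → Int
  | 0, _, _, cnt => cnt
  | _ + 1, [], _, cnt => cnt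
  | fuel + 1, v :: q, visited, cnt =>
      let s := (graph.getD v []).foldl
        (fun (s : List Int × List Bool × Int) u =>
          if PySem.List.pyGet? s.2.1 u = some false then
            (s.1 ++ [u], PySem.List.pySetD s.2.1 u true, s.2.2 + 1)
          else s)
        (q, visited, cnt)
      pvBfsLoop graph fuel s.1 s.2.1 s.2.2

def pvBfs (graph : PySem.Dict Int (List Int)) (start : Int) (visited : List Bool) : Int :=
  let visited := PySem.List.pySetD visited start true
  pvBfsLoop graph (2 * visited.length + 1) [start] visited 1

def solution (n : Int) (wires : List (List Int)) : Int :=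
  (PySem.List.pyRange 0 wires.length).foldl
    (fun answer i =>
      let temp := PySem.List.slice wires
      let graph := pvBuildGraph i temp
      let cnt := pvBfs graph 1 (PySem.List.pyRepeat [false] (n + 1))
      let other := n - cnt
      min answer ((cnt - other).natAbs : Int))
    n

-- ===== PORT B =====
-- one relaxation sweep over the wires: for j in range(len(wires)): skip j == i,
-- and if exactly one endpoint of wires[j] is in comp, add both and set grew
def pvSweep (wires : List (List Int)) (i : Int) (comp : PySem.Set Int) : PySem.Set Int × Bool :=
  (PySem.List.pyRange 0 wires.length).foldl
    (fun (s : PySem.Set Int × Bool) j =>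
      if j == i then s
      else
        match PySem.List.pyGet? wires j with
        | some w =>
          match PySem.List.pyGet? w 0, PySem.List.pyGet? w 1 with
          | some a, some b =>
            if (PySem.Set.contains s.1 a != PySem.Set.contains s.1 b) = true then
              (PySem.Set.add (PySem.Set.add s.1 a) b, true)
            else s
          | _, _ => s   -- wires[j][0]/[1] would raise IndexError here; Pre_ excludes such rows
        | none => s)    -- unreachable: j ranges over range(len(wires))
    (comp, false)

-- while grew: one sweep per iteration (fuel 2*len(wires)+2 dominates: every re-entry grew the set,
-- whose elements all come from the ≤ 2*len(wires)+1 distinct wire endpoints plus vertex 1)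
def pvWhile (wires : List (List Int)) (i : Int) : Nat → PySem.Set Int → PySem.Set Int
  | 0, comp => comp
  | fuel + 1, comp =>
    let s := pvSweep wires i comp
    if s.2 then pvWhile wires i fuel s.1 else s.1

def solution_alt (n : Int) (wires : List (List Int)) : Int :=
  (PySem.List.pyRange 0 wires.length).foldl
    (fun best i =>
      let comp := pvWhile wires i (2 * wires.length + 2) (PySem.Set.ofList [1])
      min best ((2 * PySem.Set.len comp - n).natAbs : Int))
    n

-- ===== PRECONDITION & SPEC =====
-- Pre_ excludes inputs on which A raises (a wire shorter than 2 entries, n < 1 with wires present,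
-- an out-of-range endpoint that the BFS reaches) and, when some wire touches vertex 1, restricts
-- all endpoints to the problem's vertex-label range 0..n: for labels outside it A's value is an
-- accident of its visited list (negative labels alias vertex n+1+v by Python's negative indexing,
-- labels above n raise only if reached), a corner where A's aliased count and B's literal-label
-- count are both defensible; wirings not touching vertex 1 are kept with arbitrary labels.
def Pre_solution (n : Int) (wires : List (List Int)) : Prop :=
  (wires = [] ∨ 1 ≤ n) ∧ (∀ w ∈ wires, 2 ≤ w.length) ∧
  ((∀ w ∈ wires, 0 ≤ w.getD 0 0 ∧ w.getD 0 0 ≤ n ∧ 0 ≤ w.getD 1 0 ∧ w.getD 1 0 ≤ n) ∨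
   (∀ w ∈ wires, w.getD 0 0 ≠ 1 ∧ w.getD 1 0 ≠ 1))
instance (n : Int) (wires : List (List Int)) : Decidable (Pre_solution n wires) := by
  unfold Pre_solution; infer_instance

def pvWitness_solution : Int × List (List Int) := (4, [[1, 2], [2, 3], [3, 4]])

def Spec_solution (n : Int) (wires : List (List Int)) (out : Int) : Prop := out = solution_alt n wires
instance (n : Int) (wires : List (List Int)) (out : Int) : Decidable (Spec_solution n wires out) := by
  unfold Spec_solution; infer_instance

-- ===== CLAIM (what is proved, stated in full; the proofs are below) =====
def Claim_equal_solution : Prop := ∀ (n : Int) (wires : List (List Int)), Dom_solution n wires → Pre_solution n wires → Spec_solution n wires (solution n wires)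

-- ===== LEMMAS AND PROOFS =====

-- the edges surviving the removal of wire i, as (first, second) endpoint pairs
def pvEdges (i : Int) (wires : List (List Int)) : List (Int × Int) :=
  ((PySem.List.enumerate wires).filter (fun p => decide (p.1 ≠ i))).map
    (fun p => (p.2.getD 0 0, p.2.getD 1 0))

def pvAdj (E : List (Int × Int)) (v u : Int) : Prop := (v, u) ∈ E ∨ (u, v) ∈ E

def pvClosed (E : List (Int × Int)) (S : Int → Prop) : Prop := ∀ p ∈ E, (S p.1 ↔ S p.2)

def pvMarked (vis : List Bool) (v : Int) : Prop := 0 ≤ v ∧ vis[v.toNat]? = some true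

-- named copies of the two loop bodies (definitionally equal to the ports' lambdas)
def pvStepA (i : Int) (g : PySem.Dict Int (List Int)) (p : Int × List Int) :
    PySem.Dict Int (List Int) :=
  if i == p.1 then g
  else
    match PySem.List.pyGet? p.2 0, PySem.List.pyGet? p.2 1 with
    | some a, some b =>
        let g1 := g.insert a (g.getD a [] ++ [b])
        g1.insert b (g1.getD b [] ++ [a])
    | _, _ => g

def pvStep (s : List Int × List Bool × Int) (u : Int) : List Int × List Bool × Int :=
  if PySem.List.pyGet? s.2.1 u = some false then
    (s.1 ++ [u], PySem.List.pySetD s.2.1 u true, s.2.2 + 1)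
  else s

def pvStepB (wires : List (List Int)) (i : Int) (s : PySem.Set Int × Bool) (j : Int) :
    PySem.Set Int × Bool :=
  if j == i then s
  else
    match PySem.List.pyGet? wires j with
    | some w =>
      match PySem.List.pyGet? w 0, PySem.List.pyGet? w 1 with
      | some a, some b =>
        if (PySem.Set.contains s.1 a != PySem.Set.contains s.1 b) = true then
          (PySem.Set.add (PySem.Set.add s.1 a) b, true)
        else s
      | _, _ => s
    | none => s

lemma pvBuildGraph_eq (i : Int) (temp : List (List Int)) :
    pvBuildGraph i temp = (PySem.List.enumerate temp).foldl (pvStepA i) PySem.Dict.empty := rfl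

-- ---------- counting helpers ----------

lemma pvCountSet (l : List Bool) (k : Nat) (h : l[k]? = some false) :
    (l.set k true).count true = l.count true + 1 ∧
    (l.set k true).count false + 1 = l.count false := by
  induction l generalizing k with
  | nil => simp at h
  | cons b t ih =>
    cases k with
    | zero =>
      simp only [List.getElem?_cons_zero, Option.some.injEq] at h
      subst h
      simp
    | succ k =>
      simp only [List.getElem?_cons_succ] at h
      have := ih k h
      simp only [List.set_cons_succ, List.count_cons]
      omega

lemma pvCountFilterRange (l : List Bool) :
    l.count true = ((List.range l.length).filter (fun k => l.getD k false)).length := by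
  induction l with
  | nil => simp
  | cons b t ih =>
    simp only [List.length_cons, List.range_succ_eq_map, List.filter_cons, List.filter_map,
      List.count_cons, List.getD_cons_zero]
    have : (fun k => (b :: t).getD k false) ∘ Nat.succ = fun k => t.getD k false := by
      funext k; simp
    rw [this]
    cases b <;> simp [ih]

lemma pvCount_eq (visF : List Bool) (comp : List Int) (hn : comp.Nodup)
    (hiff : ∀ v, pvMarked visF v ↔ v ∈ comp) :
    (visF.count true : Int) = PySem.Set.len comp := by
  have hlen : PySem.Set.len comp = (comp.length : Int) := rfl
  rw [hlen, pvCountFilterRange]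
  congr 1
  have hperm : (((List.range visF.length).filter (fun k => visF.getD k false)).map
      (fun k : Nat => (k : Int))).Perm comp := by
    rw [List.perm_ext_iff_of_nodup
      (((List.nodup_range).filter _).map (fun a b => by exact_mod_cast id)) hn]
    intro v
    constructor
    · rintro hv
      rcases List.mem_map.1 hv with ⟨k, hk, rfl⟩
      rcases List.mem_filter.1 hk with ⟨hkr, hkd⟩
      have hklen : k < visF.length := List.mem_range.1 hkr
      refine (hiff _).1 ⟨by positivity, ?_⟩
      have : visF[(k : Int).toNat]? = some visF[k] := by
        simp [Int.toNat_natCast, List.getElem?_eq_getElem hklen]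
      rw [this]
      have := List.getD_eq_getElem?_getD (l := visF) (i := k) (a := false)
      simp only [List.getElem?_eq_getElem hklen, Option.getD_some] at this
      simp only [Option.some.injEq]
      rw [← this]; exact hkd
    · intro hv
      have hm := (hiff v).2 hv
      rcases hm with ⟨h0, hget⟩
      refine List.mem_map.2 ⟨v.toNat, List.mem_filter.2 ⟨?_, ?_⟩, by omega⟩
      · exact List.mem_range.2 (List.getElem?_eq_some_iff.1 hget).1
      · have hk : v.toNat < visF.length := (List.getElem?_eq_some_iff.1 hget).1
        have := List.getD_eq_getElem?_getD (l := visF) (i := v.toNat) (a := false)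
        rw [hget] at this
        simp only [Option.getD_some] at this
        simpa [this]
  have := hperm.length_eq
  simpa using this

lemma pvMemDoubleInsert (g : PySem.Dict Int (List Int)) (a b v u : Int) :
    u ∈ ((g.insert a (g.getD a [] ++ [b])).insert b
          ((g.insert a (g.getD a [] ++ [b])).getD b [] ++ [a])).getD v [] ↔
      u ∈ g.getD v [] ∨ (v = a ∧ u = b) ∨ (v = b ∧ u = a) := by
  rw [PySem.Dict.getD_insert]
  by_cases hvb : v = b
  · rw [if_pos hvb, PySem.Dict.getD_insert]
    by_cases hba : b = a
    · rw [if_pos hba]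
      subst hvb; subst hba
      simp [List.mem_append]
    · rw [if_neg hba]
      subst hvb
      simp [List.mem_append, hba]
  · rw [if_neg hvb, PySem.Dict.getD_insert]
    by_cases hva : v = a
    · rw [if_pos hva]
      subst hva
      simp [List.mem_append, hvb]
    · rw [if_neg hva]
      simp [hva, hvb]

lemma pvMemFoldlStepA (i : Int) (ps : List (Int × List Int)) :
    ∀ (g : PySem.Dict Int (List Int)) (v u : Int),
      u ∈ (ps.foldl (pvStepA i) g).getD v [] ↔
        u ∈ g.getD v [] ∨
          ∃ p ∈ ps, p.1 ≠ i ∧ ∃ a b, PySem.List.pyGet? p.2 0 = some a ∧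
            PySem.List.pyGet? p.2 1 = some b ∧ ((v = a ∧ u = b) ∨ (v = b ∧ u = a)) := by
  induction ps with
  | nil => intro g v u; simp
  | cons p ps ihp =>
    intro g v u
    rw [List.foldl_cons, ihp]
    by_cases hip : i == p.1
    · have hstep : pvStepA i g p = g := by simp [pvStepA, hip]
      rw [hstep]
      have hne : ¬ p.1 ≠ i := by simpa using (beq_iff_eq.1 hip).symm
      simp only [List.mem_cons]
      constructor
      · rintro (h | h)
        · exact Or.inl h
        · exact Or.inr (by rcases h with ⟨q, hq, hrest⟩; exact ⟨q, Or.inr hq, hrest⟩)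
      · rintro (h | ⟨q, hq | hq, hrest⟩)
        · exact Or.inl h
        · subst hq; exact absurd hrest.1 hne
        · exact Or.inr ⟨q, hq, hrest⟩
    · rcases ha : PySem.List.pyGet? p.2 0 with _ | a
      · have hstep : pvStepA i g p = g := by
          simp only [pvStepA, ha]
          rw [if_neg hip]
        rw [hstep]
        simp only [List.mem_cons]
        constructor
        · rintro (h | ⟨q, hq, hrest⟩)
          · exact Or.inl h
          · exact Or.inr ⟨q, Or.inr hq, hrest⟩
        · rintro (h | ⟨q, hq | hq, hrest⟩)
          · exact Or.inl h
          · subst hq; rcases hrest with ⟨-, a', b', ha', -⟩; rw [ha] at ha'; cases ha'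
          · exact Or.inr ⟨q, hq, hrest⟩
      · rcases hb : PySem.List.pyGet? p.2 1 with _ | b
        · have hstep : pvStepA i g p = g := by
            simp only [pvStepA, ha, hb]
            rw [if_neg hip]
          rw [hstep]
          simp only [List.mem_cons]
          constructor
          · rintro (h | ⟨q, hq, hrest⟩)
            · exact Or.inl h
            · exact Or.inr ⟨q, Or.inr hq, hrest⟩
          · rintro (h | ⟨q, hq | hq, hrest⟩)
            · exact Or.inl h
            · subst hq; rcases hrest with ⟨-, a', b', -, hb', -⟩; rw [hb] at hb'; cases hb'
            · exact Or.inr ⟨q, hq, hrest⟩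
        · have hstep : pvStepA i g p
              = (g.insert a (g.getD a [] ++ [b])).insert b
                  ((g.insert a (g.getD a [] ++ [b])).getD b [] ++ [a]) := by
            simp only [pvStepA, ha, hb]
            rw [if_neg hip]
          rw [hstep, pvMemDoubleInsert]
          have hpi : p.1 ≠ i := fun h => by simp [h] at hip
          simp only [List.mem_cons]
          constructor
          · rintro ((h | h) | ⟨q, hq, hrest⟩)
            · exact Or.inl h
            · exact Or.inr ⟨p, Or.inl rfl, hpi, a, b, ha, hb, h⟩
            · exact Or.inr ⟨q, Or.inr hq, hrest⟩
          · rintro (h | ⟨q, hq | hq, hrest⟩)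
            · exact Or.inl (Or.inl h)
            · subst hq
              rcases hrest with ⟨-, a', b', ha', hb', hvu⟩
              rw [ha] at ha'; rw [hb] at hb'
              cases ha'; cases hb'
              exact Or.inl (Or.inr hvu)
            · exact Or.inr ⟨q, hq, hrest⟩

lemma pvEdges_mem_iff (i : Int) (wires : List (List Int)) (e : Int × Int) :
    e ∈ pvEdges i wires ↔ ∃ p ∈ PySem.List.enumerate wires, p.1 ≠ i ∧
      e = (p.2.getD 0 0, p.2.getD 1 0) := by
  unfold pvEdges
  simp only [List.mem_map, List.mem_filter, decide_eq_true_eq]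
  constructor
  · rintro ⟨p, ⟨hp, hpi⟩, rfl⟩; exact ⟨p, hp, hpi, rfl⟩
  · rintro ⟨p, hp, hpi, rfl⟩; exact ⟨p, ⟨hp, hpi⟩, rfl⟩

lemma pvEnumerate_row (wires : List (List Int)) (p : Int × List Int)
    (hp : p ∈ PySem.List.enumerate wires) : p.2 ∈ wires := by
  rw [PySem.List.mem_enumerate_iff] at hp
  rcases hp with ⟨k, hk, rfl⟩
  exact List.getElem_mem hk

lemma pvRowGet (w : List Int) (hw : 2 ≤ w.length) :
    PySem.List.pyGet? w 0 = some (w.getD 0 0) ∧ PySem.List.pyGet? w 1 = some (w.getD 1 0) := by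
  rcases w with _ | ⟨a, _ | ⟨b, t⟩⟩
  · simp at hw
  · simp at hw
  · refine ⟨?_, ?_⟩
    · rw [PySem.List.pyGet?_zero]; simp
    · rw [show (1 : Int) = ((1 : Nat) : Int) from rfl, PySem.List.pyGet?_natCast]; simp

lemma pvMemBuildGraph (i : Int) (wires : List (List Int))
    (hrows : ∀ w ∈ wires, 2 ≤ w.length) (v u : Int) :
    u ∈ (pvBuildGraph i (PySem.List.slice wires)).getD v [] ↔ pvAdj (pvEdges i wires) v u := by
  have hsl : PySem.List.slice wires = wires := by simp [pysem]
  rw [hsl, pvBuildGraph_eq, pvMemFoldlStepA]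
  simp only [PySem.Dict.getD_empty, List.not_mem_nil, false_or]
  unfold pvAdj
  simp only [pvEdges_mem_iff]
  constructor
  · rintro ⟨p, hp, hpi, a, b, ha, hb, hvu | hvu⟩
    · exact Or.inl ⟨p, hp, hpi, by
        obtain ⟨h0, h1⟩ := pvRowGet p.2 (hrows p.2 (pvEnumerate_row wires p hp))
        rw [ha] at h0; rw [hb] at h1
        cases h0; cases h1
        simp [hvu.1, hvu.2]⟩
    · exact Or.inr ⟨p, hp, hpi, by
        obtain ⟨h0, h1⟩ := pvRowGet p.2 (hrows p.2 (pvEnumerate_row wires p hp))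
        rw [ha] at h0; rw [hb] at h1
        cases h0; cases h1
        simp [hvu.1, hvu.2]⟩
  · rintro (⟨p, hp, hpi, he⟩ | ⟨p, hp, hpi, he⟩)
    · obtain ⟨h0, h1⟩ := pvRowGet p.2 (hrows p.2 (pvEnumerate_row wires p hp))
      refine ⟨p, hp, hpi, p.2.getD 0 0, p.2.getD 1 0, h0, h1, Or.inl ?_⟩
      exact ⟨congrArg Prod.fst he, congrArg Prod.snd he⟩
    · obtain ⟨h0, h1⟩ := pvRowGet p.2 (hrows p.2 (pvEnumerate_row wires p hp))
      refine ⟨p, hp, hpi, p.2.getD 0 0, p.2.getD 1 0, h0, h1, Or.inr ?_⟩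
      exact ⟨congrArg Prod.snd he, congrArg Prod.fst he⟩

lemma pvEdges_bounds (n i : Int) (wires : List (List Int))
    (hPre : ∀ w ∈ wires,
      2 ≤ w.length ∧ 0 ≤ w.getD 0 0 ∧ w.getD 0 0 ≤ n ∧ 0 ≤ w.getD 1 0 ∧ w.getD 1 0 ≤ n) :
    ∀ p ∈ pvEdges i wires, 0 ≤ p.1 ∧ p.1 ≤ n ∧ 0 ≤ p.2 ∧ p.2 ≤ n := by
  intro p hp
  rw [pvEdges_mem_iff] at hp
  rcases hp with ⟨q, hq, -, rfl⟩
  have := hPre q.2 (pvEnumerate_row wires q hq)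
  exact ⟨this.2.1, this.2.2.1, this.2.2.2.1, this.2.2.2.2⟩

lemma pvEdges_of_get (i : Int) (wires : List (List Int)) (j : Int) (w : List Int) (a b : Int)
    (hj : j ∈ PySem.List.pyRange 0 wires.length) (hji : j ≠ i)
    (hw : PySem.List.pyGet? wires j = some w)
    (ha : PySem.List.pyGet? w 0 = some a) (hb : PySem.List.pyGet? w 1 = some b) :
    (a, b) ∈ pvEdges i wires := by
  rw [PySem.List.mem_pyRange_one] at hj
  rw [PySem.List.pyGet?_of_nonneg wires hj.1] at hw
  have hjlen : j.toNat < wires.length := by omega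
  rw [List.getElem?_eq_getElem hjlen] at hw
  have hwe : w = wires[j.toNat] := by injection hw with h; exact h.symm
  rw [pvEdges_mem_iff]
  refine ⟨(j, w), ?_, hji, ?_⟩
  · rw [PySem.List.mem_enumerate_iff]
    exact ⟨j.toNat, hjlen, by rw [hwe]; congr 1; omega⟩
  · have h2 : 2 ≤ w.length := by
      clear hwe hw
      rcases w with _ | ⟨x, _ | ⟨y, t⟩⟩
      · rw [PySem.List.pyGet?_zero] at ha; simp at ha
      · rw [show (1 : Int) = ((1 : Nat) : Int) from rfl, PySem.List.pyGet?_natCast] at hb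
        simp at hb
      · simp
    obtain ⟨h0, h1⟩ := pvRowGet w h2
    rw [ha] at h0; rw [hb] at h1
    cases h0; cases h1
    rfl

lemma pvMarkedSet (vis : List Bool) (u : Int) (hu0 : 0 ≤ u) (huN : u.toNat < vis.length) :
    ∀ v, pvMarked (vis.set u.toNat true) v ↔ pvMarked vis v ∨ v = u := by
  intro v
  unfold pvMarked
  rw [List.getElem?_set]
  by_cases hvu : u.toNat = v.toNat
  · rw [if_pos hvu, if_pos huN]
    constructor
    · rintro ⟨h0, -⟩
      right; omega
    · rintro (⟨h0, _⟩ | rfl)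
      · exact ⟨h0, rfl⟩
      · exact ⟨hu0, rfl⟩
  · rw [if_neg hvu]
    constructor
    · rintro ⟨h0, hg⟩; exact Or.inl ⟨h0, hg⟩
    · rintro (⟨h0, hg⟩ | rfl)
      · exact ⟨h0, hg⟩
      · exact absurd rfl hvu

lemma pvStepRun (N : Nat) (L : List Int) (hL : ∀ u ∈ L, 0 ≤ u ∧ u < (N : Int)) :
    ∀ (q : List Int) (vis : List Bool), vis.length = N →
      (L.foldl pvStep (q, vis, (vis.count true : Int))).2.1.length = N ∧
      (L.foldl pvStep (q, vis, (vis.count true : Int))).2.2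
        = ((L.foldl pvStep (q, vis, (vis.count true : Int))).2.1.count true : Int) ∧
      (∀ v, pvMarked vis v → pvMarked (L.foldl pvStep (q, vis, (vis.count true : Int))).2.1 v) ∧
      (∀ u ∈ L, pvMarked (L.foldl pvStep (q, vis, (vis.count true : Int))).2.1 u) ∧
      (∀ v, pvMarked (L.foldl pvStep (q, vis, (vis.count true : Int))).2.1 v →
        pvMarked vis v ∨ v ∈ L) ∧
      (∀ v, pvMarked (L.foldl pvStep (q, vis, (vis.count true : Int))).2.1 v →
        ¬ pvMarked vis v → v ∈ (L.foldl pvStep (q, vis, (vis.count true : Int))).1) ∧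
      (∀ x ∈ q, x ∈ (L.foldl pvStep (q, vis, (vis.count true : Int))).1) ∧
      ((L.foldl pvStep (q, vis, (vis.count true : Int))).1.length
          + 2 * (L.foldl pvStep (q, vis, (vis.count true : Int))).2.1.count false
        ≤ q.length + 2 * vis.count false) ∧
      ((∀ x ∈ q, pvMarked vis x) →
        ∀ x ∈ (L.foldl pvStep (q, vis, (vis.count true : Int))).1,
          pvMarked (L.foldl pvStep (q, vis, (vis.count true : Int))).2.1 x) := by
  revert hL
  induction L with
  | nil =>
    intro hL q vis hvN
    refine ⟨hvN, rfl, fun v h => h, fun u hu => absurd hu (List.not_mem_nil), fun v h => Or.inl h,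
      fun v h1 h2 => absurd h1 h2, fun x hx => hx, le_refl _, fun hq x hx => hq x hx⟩
  | cons u L ih =>
    intro hL q vis hvN
    have hu0 : 0 ≤ u := (hL u List.mem_cons_self).1
    have huN : u < (N : Int) := (hL u List.mem_cons_self).2
    have huN' : u.toNat < vis.length := by rw [hvN]; omega
    have hL' : ∀ x ∈ L, 0 ≤ x ∧ x < (N : Int) := fun x hx => hL x (List.mem_cons_of_mem _ hx)
    rw [List.foldl_cons]
    rcases hg : vis[u.toNat]? with _ | b
    · rw [List.getElem?_eq_none_iff] at hg; omega
    · rcases b with _ | _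
      · -- vis[u] = false : mark it
        have hstep : pvStep (q, vis, (vis.count true : Int)) u
            = (q ++ [u], vis.set u.toNat true, (vis.count true : Int) + 1) := by
          unfold pvStep
          rw [if_pos (by rw [PySem.List.pyGet?_of_nonneg _ hu0, hg] : PySem.List.pyGet?
            (q, vis, (vis.count true : Int)).2.1 u = some false)]
          rw [PySem.List.pySetD_of_nonneg _ _ hu0]
        have hcnt := pvCountSet vis u.toNat hg
        have hcnt1 : (vis.count true : Int) + 1 = ((vis.set u.toNat true).count true : Int) := by
          rw [hcnt.1]; push_cast; ring
        rw [hstep, hcnt1]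
        have hmk := pvMarkedSet vis u hu0 huN'
        obtain ⟨g1, g2, g3, g4, g5, g6, g7, g8, g9⟩ :=
          ih hL' (q ++ [u]) (vis.set u.toNat true) (by rw [List.length_set]; exact hvN)
        refine ⟨g1, g2, ?_, ?_, ?_, ?_, ?_, ?_, ?_⟩
        · intro v hv; exact g3 v ((hmk v).2 (Or.inl hv))
        · intro x hx
          rcases List.mem_cons.1 hx with rfl | hx
          · exact g3 x ((hmk x).2 (Or.inr rfl))
          · exact g4 x hx
        · intro v hv
          rcases g5 v hv with hv' | hv'
          · rcases (hmk v).1 hv' with h | rfl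
            · exact Or.inl h
            · exact Or.inr List.mem_cons_self
          · exact Or.inr (List.mem_cons_of_mem _ hv')
        · intro v hv hnv
          rcases g5 v hv with hv' | hv'
          · rcases (hmk v).1 hv' with h | rfl
            · exact absurd h hnv
            · exact g7 v (List.mem_append.2 (Or.inr List.mem_cons_self))
          · by_cases hm' : pvMarked (vis.set u.toNat true) v
            · rcases (hmk v).1 hm' with h | rfl
              · exact absurd h hnv
              · exact g7 v (List.mem_append.2 (Or.inr List.mem_cons_self))
            · exact g6 v hv hm'
        · intro x hx; exact g7 x (List.mem_append.2 (Or.inl hx))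
        · have hlen : (q ++ [u]).length = q.length + 1 := by simp
          have hcf : (vis.set u.toNat true).count false + 1 = vis.count false := hcnt.2
          omega
        · intro hq x hx
          refine g9 ?_ x hx
          intro y hy
          rcases List.mem_append.1 hy with hy | hy
          · exact (hmk y).2 (Or.inl (hq y hy))
          · rcases List.mem_singleton.1 hy with rfl
            exact (hmk y).2 (Or.inr rfl)
      · -- vis[u] = true : no change
        have hstep : pvStep (q, vis, (vis.count true : Int)) u
            = (q, vis, (vis.count true : Int)) := by
          unfold pvStep
          rw [if_neg (by rw [PySem.List.pyGet?_of_nonneg _ hu0, hg]; simp : ¬ PySem.List.pyGet?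
            (q, vis, (vis.count true : Int)).2.1 u = some false)]
        rw [hstep]
        obtain ⟨g1, g2, g3, g4, g5, g6, g7, g8, g9⟩ := ih hL' q vis hvN
        refine ⟨g1, g2, g3, ?_, ?_, g6, g7, g8, g9⟩
        · intro x hx
          rcases List.mem_cons.1 hx with rfl | hx
          · exact g3 x ⟨hu0, hg⟩
          · exact g4 x hx
        · intro v hv
          rcases g5 v hv with h | h
          · exact Or.inl h
          · exact Or.inr (List.mem_cons_of_mem _ h)

lemma pvBfsRun (G : PySem.Dict Int (List Int)) (E : List (Int × Int)) (N : Nat)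
    (hGE : ∀ v u, u ∈ G.getD v [] ↔ pvAdj E v u)
    (hEb : ∀ p ∈ E, 0 ≤ p.1 ∧ p.1 < (N : Int) ∧ 0 ≤ p.2 ∧ p.2 < (N : Int)) :
    ∀ (fuel : Nat) (q : List Int) (vis : List Bool), vis.length = N →
      (∀ x ∈ q, pvMarked vis x) →
      (∀ v, pvMarked vis v → v ∉ q → ∀ u, u ∈ G.getD v [] → pvMarked vis u) →
      q.length + 2 * vis.count false < fuel →
      ∃ visF, pvBfsLoop G fuel q vis (vis.count true : Int) = (visF.count true : Int) ∧
        visF.length = N ∧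
        (∀ v, pvMarked vis v → pvMarked visF v) ∧
        (∀ v u, pvMarked visF v → u ∈ G.getD v [] → pvMarked visF u) ∧
        (∀ S : Int → Prop, pvClosed E S → (∀ v, pvMarked vis v → S v) →
          ∀ v, pvMarked visF v → S v) := by
  intro fuel
  induction fuel with
  | zero =>
    intro q vis _ _ _ hfuel
    exact absurd hfuel (by omega)
  | succ fuel ih =>
    intro q vis hvN hq hcl hfuel
    cases q with
    | nil =>
      refine ⟨vis, rfl, hvN, fun v h => h, ?_, fun S _ h v hv => h v hv⟩
      intro v u hv hu
      exact hcl v hv List.not_mem_nil u hu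
    | cons v q' =>
      have hLb : ∀ u ∈ G.getD v [], 0 ≤ u ∧ u < (N : Int) := by
        intro u hu
        rcases (hGE v u).1 hu with h | h
        · have := hEb _ h; exact ⟨this.2.2.1, this.2.2.2⟩
        · have := hEb _ h; exact ⟨this.1, this.2.1⟩
      obtain ⟨g1, g2, g3, g4, g5, g6, g7, g8, g9⟩ := pvStepRun N (G.getD v []) hLb q' vis hvN
      have hunf : pvBfsLoop G (fuel + 1) (v :: q') vis (vis.count true : Int)
          = pvBfsLoop G fuel
              ((G.getD v []).foldl pvStep (q', vis, (vis.count true : Int))).1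
              ((G.getD v []).foldl pvStep (q', vis, (vis.count true : Int))).2.1
              ((G.getD v []).foldl pvStep (q', vis, (vis.count true : Int))).2.2 := rfl
      rw [hunf, g2]
      have hq' : ∀ x ∈ q', pvMarked vis x := fun x hx => hq x (List.mem_cons_of_mem _ hx)
      have hqr := g9 hq'
      have hclr : ∀ w, pvMarked ((G.getD v []).foldl pvStep (q', vis, (vis.count true : Int))).2.1 w →
          w ∉ ((G.getD v []).foldl pvStep (q', vis, (vis.count true : Int))).1 →
          ∀ u, u ∈ G.getD w [] →
            pvMarked ((G.getD v []).foldl pvStep (q', vis, (vis.count true : Int))).2.1 u := by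
        intro w hw hwr u hu
        by_cases hwv : w = v
        · subst hwv; exact g4 u hu
        · by_cases hwvis : pvMarked vis w
          · have hwq : w ∉ v :: q' := by
              intro hmem
              rcases List.mem_cons.1 hmem with rfl | hmem
              · exact hwv rfl
              · exact hwr (g7 w hmem)
            exact g3 u (hcl w hwvis hwq u hu)
          · exact absurd (g6 w hw hwvis) hwr
      have hfuel' : ((G.getD v []).foldl pvStep (q', vis, (vis.count true : Int))).1.length
          + 2 * ((G.getD v []).foldl pvStep (q', vis, (vis.count true : Int))).2.1.count false
          < fuel := by
        have hlen : (v :: q').length = q'.length + 1 := rfl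
        omega
      obtain ⟨visF, hF1, hF2, hF3, hF4, hF5⟩ := ih _ _ g1 hqr hclr hfuel'
      refine ⟨visF, hF1, hF2, fun w hw => hF3 w (g3 w hw), hF4, ?_⟩
      intro S hS hvisS w hw
      refine hF5 S hS ?_ w hw
      intro y hy
      rcases g5 y hy with h | h
      · exact hvisS y h
      · have hSv : S v := hvisS v (hq v List.mem_cons_self)
        rcases (hGE v y).1 h with he | he
        · exact (hS _ he).1 hSv
        · exact (hS _ he).2 hSv

lemma pvStepB_cases (wires : List (List Int)) (i : Int) (s : PySem.Set Int × Bool) (j : Int) :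
    pvStepB wires i s j = s ∨
      ∃ w a b, j ≠ i ∧ PySem.List.pyGet? wires j = some w ∧
        PySem.List.pyGet? w 0 = some a ∧ PySem.List.pyGet? w 1 = some b ∧
        (PySem.Set.contains s.1 a != PySem.Set.contains s.1 b) = true ∧
        pvStepB wires i s j = (PySem.Set.add (PySem.Set.add s.1 a) b, true) := by
  by_cases hj : j == i
  · left; simp [pvStepB, hj]
  · rcases hw : PySem.List.pyGet? wires j with _ | w
    · left; simp [pvStepB, hj, hw]
    · rcases ha : PySem.List.pyGet? w 0 with _ | a
      · left; simp [pvStepB, hj, hw, ha]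
      · rcases hb : PySem.List.pyGet? w 1 with _ | b
        · left; simp [pvStepB, hj, hw, ha, hb]
        · by_cases hc : (PySem.Set.contains s.1 a != PySem.Set.contains s.1 b) = true
          · right
            refine ⟨w, a, b, by simpa using hj, rfl, ha, hb, hc, ?_⟩
            simp only [pvStepB, hw, ha, hb]
            rw [if_neg hj, if_pos hc]
          · left
            simp only [pvStepB, hw, ha, hb]
            rw [if_neg hj, if_neg hc]

lemma pvAddLen (s : PySem.Set Int) (x : Int) :
    s.length ≤ (PySem.Set.add s x).length ∧ (PySem.Set.add s x).length ≤ s.length + 1 ∧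
    (x ∉ s → (PySem.Set.add s x).length = s.length + 1) := by
  rw [PySem.Set.add_eq_ite]
  split_ifs with h <;> simp_all

lemma pvSweepMono (wires : List (List Int)) (i : Int) (js : List Int) :
    ∀ s : PySem.Set Int × Bool,
      (∀ x ∈ s.1, x ∈ (js.foldl (pvStepB wires i) s).1) ∧
      (s.1.Nodup → (js.foldl (pvStepB wires i) s).1.Nodup) ∧
      s.1.length ≤ (js.foldl (pvStepB wires i) s).1.length := by
  induction js with
  | nil => intro s; exact ⟨fun x hx => hx, id, le_refl _⟩
  | cons j js ih =>
    intro s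
    rw [List.foldl_cons]
    rcases pvStepB_cases wires i s j with heq | ⟨w, a, b, _, _, _, _, _, heq⟩ <;> rw [heq]
    · exact ih s
    · obtain ⟨h1, h2, h3⟩ := ih (PySem.Set.add (PySem.Set.add s.1 a) b, true)
      refine ⟨fun x hx => h1 x ?_, fun hnd => h2 ?_, le_trans ?_ h3⟩
      · exact (PySem.Set.mem_add _ _ _).2 (Or.inl ((PySem.Set.mem_add _ _ _).2 (Or.inl hx)))
      · exact PySem.Set.nodup_add _ _ (PySem.Set.nodup_add _ _ hnd)
      · exact le_trans (pvAddLen s.1 a).1 (pvAddLen _ b).1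

lemma pvSweepFlagMono (wires : List (List Int)) (i : Int) (js : List Int) :
    ∀ s : PySem.Set Int × Bool, s.2 = true → (js.foldl (pvStepB wires i) s).2 = true := by
  induction js with
  | nil => intro s h; exact h
  | cons j js ih =>
    intro s h
    rw [List.foldl_cons]
    rcases pvStepB_cases wires i s j with heq | ⟨w, a, b, _, _, _, _, _, heq⟩ <;> rw [heq]
    · exact ih s h
    · exact ih _ rfl

lemma pvSweepGrow (wires : List (List Int)) (i : Int) (js : List Int) :
    ∀ s : PySem.Set Int × Bool, (js.foldl (pvStepB wires i) s).2 = true →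
      s.2 = true ∨ s.1.length < (js.foldl (pvStepB wires i) s).1.length := by
  induction js with
  | nil => intro s h; exact Or.inl h
  | cons j js ih =>
    intro s h
    rw [List.foldl_cons] at h ⊢
    rcases pvStepB_cases wires i s j with heq | ⟨w, a, b, _, _, _, _, hc, heq⟩
    · rw [heq] at h ⊢; exact ih s h
    · rw [heq] at h ⊢
      right
      have hstrict : s.1.length < (PySem.Set.add (PySem.Set.add s.1 a) b).length := by
        by_cases hma : a ∈ s.1
        · have hmb : b ∉ s.1 := by
            intro hmb
            rw [(PySem.Set.contains_iff s.1 a).2 hma, (PySem.Set.contains_iff s.1 b).2 hmb] at hc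
            simp at hc
          have hmb' : b ∉ PySem.Set.add s.1 a := by
            rw [PySem.Set.mem_add]
            rintro (h | rfl)
            · exact hmb h
            · exact hmb hma
          have := (pvAddLen (PySem.Set.add s.1 a) b).2.2 hmb'
          have := (pvAddLen s.1 a).1
          omega
        · have := (pvAddLen s.1 a).2.2 hma
          have := (pvAddLen (PySem.Set.add s.1 a) b).1
          omega
      exact lt_of_lt_of_le hstrict
        (pvSweepMono wires i js (PySem.Set.add (PySem.Set.add s.1 a) b, true)).2.2

lemma pvSweepUnchanged (wires : List (List Int)) (i : Int) (js : List Int) :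
    ∀ s : PySem.Set Int × Bool, (js.foldl (pvStepB wires i) s).2 = false →
      js.foldl (pvStepB wires i) s = s := by
  induction js with
  | nil => intro s _; rfl
  | cons j js ih =>
    intro s h
    rw [List.foldl_cons] at h ⊢
    rcases pvStepB_cases wires i s j with heq | ⟨w, a, b, _, _, _, _, _, heq⟩
    · rw [heq] at h ⊢; exact ih s h
    · rw [heq] at h
      have := pvSweepFlagMono wires i js (PySem.Set.add (PySem.Set.add s.1 a) b, true) rfl
      rw [this] at h; cases h

lemma pvSweepClosed (wires : List (List Int)) (i : Int) (js : List Int) :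
    ∀ s : PySem.Set Int × Bool, (js.foldl (pvStepB wires i) s).2 = false →
      ∀ j ∈ js, j ≠ i → ∀ w a b, PySem.List.pyGet? wires j = some w →
        PySem.List.pyGet? w 0 = some a → PySem.List.pyGet? w 1 = some b →
        (a ∈ s.1 ↔ b ∈ s.1) := by
  induction js with
  | nil => intro s _ j hj; cases hj
  | cons j0 js ih =>
    intro s h j hj hji w a b hw ha hb
    rw [List.foldl_cons] at h
    have hstep : pvStepB wires i s j0 = s := by
      rcases pvStepB_cases wires i s j0 with heq | ⟨w', a', b', _, _, _, _, _, heq⟩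
      · exact heq
      · rw [heq] at h
        have := pvSweepFlagMono wires i js (PySem.Set.add (PySem.Set.add s.1 a') b', true) rfl
        rw [this] at h; cases h
    rw [hstep] at h
    rcases List.mem_cons.1 hj with rfl | hjs
    · -- head: the condition must have been false
      by_cases hc : (PySem.Set.contains s.1 a != PySem.Set.contains s.1 b) = true
      · exfalso
        have : pvStepB wires i s j = (PySem.Set.add (PySem.Set.add s.1 a) b, true) := by
          simp only [pvStepB, hw, ha, hb]
          rw [if_neg (by simpa using hji : ¬ (j == i) = true), if_pos hc]
        rw [this] at hstep
        have hlen := congrArg (fun p => (p.1 : List Int).length) hstep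
        simp only at hlen
        by_cases hma : a ∈ s.1
        · have hmb : b ∉ s.1 := by
            intro hmb
            rw [(PySem.Set.contains_iff s.1 a).2 hma, (PySem.Set.contains_iff s.1 b).2 hmb] at hc
            simp at hc
          have hmb' : b ∉ PySem.Set.add s.1 a := by
            rw [PySem.Set.mem_add]; rintro (h | rfl) <;> [exact hmb h; exact hmb hma]
          have := (pvAddLen (PySem.Set.add s.1 a) b).2.2 hmb'
          have := (pvAddLen s.1 a).1
          omega
        · have := (pvAddLen s.1 a).2.2 hma
          have := (pvAddLen (PySem.Set.add s.1 a) b).1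
          omega
      · have hceq : PySem.Set.contains s.1 a = PySem.Set.contains s.1 b := by
          by_contra hne
          exact hc (by simpa [bne_iff_ne] using hne)
        constructor
        · intro hma
          have hb' : PySem.Set.contains s.1 b = true := by
            rw [← hceq]; exact (PySem.Set.contains_iff s.1 a).2 hma
          exact (PySem.Set.contains_iff s.1 b).1 hb'
        · intro hmb
          have ha' : PySem.Set.contains s.1 a = true := by
            rw [hceq]; exact (PySem.Set.contains_iff s.1 b).2 hmb
          exact (PySem.Set.contains_iff s.1 a).1 ha'
    · exact ih s h j hjs hji w a b hw ha hb

lemma pvSweepMin (wires : List (List Int)) (i : Int) (js : List Int) (S : Int → Prop)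
    (hS : ∀ j ∈ js, j ≠ i → ∀ w a b, PySem.List.pyGet? wires j = some w →
      PySem.List.pyGet? w 0 = some a → PySem.List.pyGet? w 1 = some b → (S a ↔ S b)) :
    ∀ s : PySem.Set Int × Bool, (∀ x ∈ s.1, S x) →
      ∀ x ∈ (js.foldl (pvStepB wires i) s).1, S x := by
  induction js with
  | nil => intro s hs x hx; exact hs x hx
  | cons j js ih =>
    intro s hs
    rw [List.foldl_cons]
    rcases pvStepB_cases wires i s j with heq | ⟨w, a, b, hji, hw, ha, hb, hc, heq⟩ <;> rw [heq]
    · exact ih (fun j' hj' => hS j' (List.mem_cons_of_mem _ hj')) s hs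
    · have hiff := hS j (List.mem_cons_self) hji w a b hw ha hb
      have hSab : S a ∧ S b := by
        by_cases hma : a ∈ s.1
        · exact ⟨hs a hma, hiff.1 (hs a hma)⟩
        · have hmb : b ∈ s.1 := by
            by_contra hmb
            have hca : PySem.Set.contains s.1 a = false := by
              rw [← Bool.not_eq_true]; exact fun h => hma ((PySem.Set.contains_iff s.1 a).1 h)
            have hcb : PySem.Set.contains s.1 b = false := by
              rw [← Bool.not_eq_true]; exact fun h => hmb ((PySem.Set.contains_iff s.1 b).1 h)
            rw [hca, hcb] at hc
            simp at hc
          exact ⟨hiff.2 (hs b hmb), hs b hmb⟩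
      refine ih (fun j' hj' => hS j' (List.mem_cons_of_mem _ hj')) _ ?_
      intro x hx
      rcases (PySem.Set.mem_add _ _ _).1 hx with hx | rfl
      · rcases (PySem.Set.mem_add _ _ _).1 hx with hx | rfl
        · exact hs x hx
        · exact hSab.1
      · exact hSab.2

lemma pvWhileRun (wires : List (List Int)) (i : Int) (U : List Int)
    (hend : ∀ j ∈ PySem.List.pyRange 0 wires.length, j ≠ i →
      ∀ w a b, PySem.List.pyGet? wires j = some w → PySem.List.pyGet? w 0 = some a →
        PySem.List.pyGet? w 1 = some b → a ∈ U ∧ b ∈ U) :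
    ∀ (fuel : Nat) (c : PySem.Set Int), c.Nodup → (∀ x ∈ c, x ∈ U) →
      U.length < fuel + c.length →
      (∀ x ∈ c, x ∈ pvWhile wires i fuel c) ∧ (pvWhile wires i fuel c).Nodup ∧
      (∀ j ∈ PySem.List.pyRange 0 wires.length, j ≠ i →
        ∀ w a b, PySem.List.pyGet? wires j = some w → PySem.List.pyGet? w 0 = some a →
          PySem.List.pyGet? w 1 = some b →
          (a ∈ pvWhile wires i fuel c ↔ b ∈ pvWhile wires i fuel c)) ∧
      (∀ S : Int → Prop,
        (∀ j ∈ PySem.List.pyRange 0 wires.length, j ≠ i →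
          ∀ w a b, PySem.List.pyGet? wires j = some w → PySem.List.pyGet? w 0 = some a →
            PySem.List.pyGet? w 1 = some b → (S a ↔ S b)) →
        (∀ x ∈ c, S x) → ∀ x ∈ pvWhile wires i fuel c, S x) := by
  intro fuel
  induction fuel with
  | zero =>
    intro c hc hcU hlen
    exact absurd ((hc.subperm hcU).length_le) (by omega)
  | succ fuel ih =>
    intro c hc hcU hlen
    have hstep : pvWhile wires i (fuel + 1) c
        = if (pvSweep wires i c).2 then pvWhile wires i fuel (pvSweep wires i c).1
          else (pvSweep wires i c).1 := rfl
    rcases hflag : (pvSweep wires i c).2 with _ | _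
    · -- no growth: the sweep left c unchanged and c is closed
      have huch : (PySem.List.pyRange 0 wires.length).foldl (pvStepB wires i) (c, false)
          = (c, false) :=
        pvSweepUnchanged wires i _ (c, false) hflag
      have hres : pvWhile wires i (fuel + 1) c = c := by
        rw [hstep, if_neg (by rw [hflag]; exact Bool.false_ne_true)]
        show ((PySem.List.pyRange 0 wires.length).foldl (pvStepB wires i) (c, false)).1 = c
        rw [huch]
      rw [hres]
      refine ⟨fun x hx => hx, hc, ?_, fun S _ hcS x hx => hcS x hx⟩
      intro j hj hji w a b hw ha hb
      exact pvSweepClosed wires i _ (c, false) hflag j hj hji w a b hw ha hb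
    · -- growth: recurse on the strictly larger component
      have hres : pvWhile wires i (fuel + 1) c
          = pvWhile wires i fuel (pvSweep wires i c).1 := by
        rw [hstep, if_pos hflag]
      obtain ⟨hmem, hnd, hle⟩ := pvSweepMono wires i (PySem.List.pyRange 0 wires.length) (c, false)
      have hgrow : c.length < (pvSweep wires i c).1.length := by
        rcases pvSweepGrow wires i (PySem.List.pyRange 0 wires.length) (c, false) hflag with h | h
        · cases h
        · exact h
      have hsubU : ∀ x ∈ (pvSweep wires i c).1, x ∈ U := by
        refine pvSweepMin wires i _ (fun x => x ∈ U) ?_ (c, false) hcU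
        intro j hj hji w a b hw ha hb
        have := hend j hj hji w a b hw ha hb
        exact ⟨fun _ => this.2, fun _ => this.1⟩
      obtain ⟨ih1, ih2, ih3, ih4⟩ := ih (pvSweep wires i c).1 (hnd hc) hsubU (by omega)
      rw [hres]
      refine ⟨fun x hx => ih1 x (hmem x hx), ih2, ih3, ?_⟩
      intro S hS hcS x hx
      exact ih4 S hS (pvSweepMin wires i _ S hS (c, false) hcS) x hx

lemma pvEdges_get (i : Int) (wires : List (List Int)) (hrows : ∀ w ∈ wires, 2 ≤ w.length)
    (p : Int × Int) (hp : p ∈ pvEdges i wires) :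
    ∃ j w, j ∈ PySem.List.pyRange 0 wires.length ∧ j ≠ i ∧
      PySem.List.pyGet? wires j = some w ∧
      PySem.List.pyGet? w 0 = some p.1 ∧ PySem.List.pyGet? w 1 = some p.2 := by
  rw [pvEdges_mem_iff] at hp
  rcases hp with ⟨q, hq, hqi, rfl⟩
  rw [PySem.List.mem_enumerate_iff] at hq
  rcases hq with ⟨k, hk, rfl⟩
  obtain ⟨h0, h1⟩ := pvRowGet wires[k] (hrows _ (List.getElem_mem hk))
  refine ⟨(0 : Int) + (k : Int), wires[k], ?_, hqi, ?_, h0, h1⟩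
  · rw [PySem.List.mem_pyRange_one]
    constructor <;> omega
  · rw [show (0 : Int) + (k : Int) = ((k : Nat) : Int) by omega, PySem.List.pyGet?_natCast]
    rw [List.getElem?_eq_getElem hk]

-- ---------- assembling one removal ----------

lemma pvBfsLoop_isolated (G : PySem.Dict Int (List Int)) (v : Int) (vis : List Bool) (cnt : Int)
    (hG : G.getD v [] = []) (f : Nat) :
    pvBfsLoop G (f + 2) [v] vis cnt = cnt := by
  have h1 : pvBfsLoop G (f + 1 + 1) [v] vis cnt
      = pvBfsLoop G (f + 1) ((G.getD v []).foldl pvStep ([], vis, cnt)).1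
          ((G.getD v []).foldl pvStep ([], vis, cnt)).2.1
          ((G.getD v []).foldl pvStep ([], vis, cnt)).2.2 := rfl
  rw [h1, hG]
  rfl

lemma pvGetD_fst (w : List Int) (a : Int) (ha : PySem.List.pyGet? w 0 = some a) :
    w.getD 0 0 = a := by
  rw [List.getD_eq_getElem?_getD, ← PySem.List.pyGet?_zero, ha]
  rfl

lemma pvGetD_snd (w : List Int) (b : Int) (hb : PySem.List.pyGet? w 1 = some b) :
    w.getD 1 0 = b := by
  rw [List.getD_eq_getElem?_getD, ← show PySem.List.pyGet? w 1 = w[1]? from by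
    rw [show (1 : Int) = ((1 : Nat) : Int) from rfl, PySem.List.pyGet?_natCast], hb]
  rfl

-- when no wire touches vertex 1, both programs count the component {1}
lemma pvPerI1 (n : Int) (wires : List (List Int)) (hn : 1 ≤ n)
    (h1 : ∀ w ∈ wires, w.getD 0 0 ≠ 1 ∧ w.getD 1 0 ≠ 1) (i : Int) :
    pvBfs (pvBuildGraph i (PySem.List.slice wires)) 1 (PySem.List.pyRepeat [false] (n + 1))
      = PySem.Set.len (pvWhile wires i (2 * wires.length + 2) (PySem.Set.ofList [1])) := by
  have hG1 : (pvBuildGraph i (PySem.List.slice wires)).getD 1 [] = [] := by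
    rw [List.eq_nil_iff_forall_not_mem]
    intro u hu
    have hsl : PySem.List.slice wires = wires := by simp [pysem]
    rw [hsl, pvBuildGraph_eq, pvMemFoldlStepA] at hu
    rcases hu with hu | ⟨p, hp, -, a, b, ha, hb, hab⟩
    · rw [PySem.Dict.getD_empty] at hu; cases hu
    · have hrow := h1 p.2 (pvEnumerate_row wires p hp)
      rcases hab with ⟨h1a, -⟩ | ⟨h1b, -⟩
      · exact hrow.1 (by rw [pvGetD_fst p.2 a ha, ← h1a])
      · exact hrow.2 (by rw [pvGetD_snd p.2 b hb, ← h1b])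
  have hA : pvBfs (pvBuildGraph i (PySem.List.slice wires)) 1
      (PySem.List.pyRepeat [false] (n + 1)) = 1 := by
    show pvBfsLoop (pvBuildGraph i (PySem.List.slice wires))
        (2 * (PySem.List.pySetD (PySem.List.pyRepeat [false] (n + 1)) 1 true).length + 1) [1]
        (PySem.List.pySetD (PySem.List.pyRepeat [false] (n + 1)) 1 true) 1 = 1
    have hlen : 1 ≤ (PySem.List.pySetD (PySem.List.pyRepeat [false] (n + 1)) 1 true).length := by
      rw [PySem.List.length_pySetD, PySem.List.pyRepeat_singleton, List.length_replicate]
      omega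
    rw [show 2 * (PySem.List.pySetD (PySem.List.pyRepeat [false] (n + 1)) 1 true).length + 1
        = (2 * (PySem.List.pySetD (PySem.List.pyRepeat [false] (n + 1)) 1 true).length - 1) + 2
      from by omega]
    exact pvBfsLoop_isolated _ 1 _ 1 hG1 _
  have hsweep : ∀ js : List Int, js.foldl (pvStepB wires i) (([1] : List Int), false)
      = (([1] : List Int), false) := by
    intro js
    induction js with
    | nil => rfl
    | cons j js ih =>
      rw [List.foldl_cons]
      rcases pvStepB_cases wires i ([1], false) j with heq | ⟨w, a, b, hji, hw, ha, hb, hc, heq⟩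
      · rw [heq, ih]
      · exfalso
        have hrow := h1 w (PySem.List.mem_of_pyGet?_eq_some wires hw)
        have hca : PySem.Set.contains (([1] : List Int)) a = false := by
          rw [← Bool.not_eq_true]
          intro hcab
          rcases List.mem_singleton.1 ((PySem.Set.contains_iff _ _).1 hcab) with rfl
          exact hrow.1 (pvGetD_fst w 1 ha)
        have hcb : PySem.Set.contains (([1] : List Int)) b = false := by
          rw [← Bool.not_eq_true]
          intro hcab
          rcases List.mem_singleton.1 ((PySem.Set.contains_iff _ _).1 hcab) with rfl
          exact hrow.2 (pvGetD_snd w 1 hb)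
        have hc' : (PySem.Set.contains (([1] : List Int)) a
            != PySem.Set.contains (([1] : List Int)) b) = true := hc
        rw [hca, hcb] at hc'
        simp at hc'
  have hwhile : pvWhile wires i (2 * wires.length + 2) (PySem.Set.ofList [1]) = [1] := by
    have hofl : PySem.Set.ofList ([1] : List Int) = [1] := rfl
    rw [hofl]
    have hst : pvWhile wires i (2 * wires.length + 1 + 1) ([1] : List Int)
        = if (pvSweep wires i [1]).2 then
            pvWhile wires i (2 * wires.length + 1) (pvSweep wires i [1]).1
          else (pvSweep wires i [1]).1 := rfl
    have hsw : pvSweep wires i ([1] : List Int) = (([1] : List Int), false) :=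
      hsweep (PySem.List.pyRange 0 wires.length)
    rw [show 2 * wires.length + 2 = 2 * wires.length + 1 + 1 from rfl, hst, hsw]
    rfl
  rw [hA, hwhile]
  rfl


lemma pvPerI (n : Int) (wires : List (List Int)) (hn : 1 ≤ n)
    (hrows : ∀ w ∈ wires, 2 ≤ w.length)
    (hbnd : ∀ w ∈ wires, 0 ≤ w.getD 0 0 ∧ w.getD 0 0 ≤ n ∧ 0 ≤ w.getD 1 0 ∧ w.getD 1 0 ≤ n)
    (i : Int) :
    pvBfs (pvBuildGraph i (PySem.List.slice wires)) 1 (PySem.List.pyRepeat [false] (n + 1))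
      = PySem.Set.len (pvWhile wires i (2 * wires.length + 2) (PySem.Set.ofList [1])) := by
  have hPre : ∀ w ∈ wires,
      2 ≤ w.length ∧ 0 ≤ w.getD 0 0 ∧ w.getD 0 0 ≤ n ∧ 0 ≤ w.getD 1 0 ∧ w.getD 1 0 ≤ n :=
    fun w hw => ⟨hrows w hw, (hbnd w hw).1, (hbnd w hw).2.1, (hbnd w hw).2.2.1, (hbnd w hw).2.2.2⟩
  set N := (n + 1).toNat with hNdef
  have hN2 : 2 ≤ N := by omega
  have hNcast : ((N : Nat) : Int) = n + 1 := Int.toNat_of_nonneg (by omega)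
  set G := pvBuildGraph i (PySem.List.slice wires) with hG
  set E := pvEdges i wires with hE
  -- the A side: run the BFS
  have hrep : PySem.List.pyRepeat [false] (n + 1) = List.replicate N false :=
    PySem.List.pyRepeat_singleton false (n + 1)
  have hset : PySem.List.pySetD (List.replicate N false) 1 true
      = (List.replicate N false).set 1 true := by
    rw [PySem.List.pySetD_of_nonneg _ _ (by norm_num : (0 : Int) ≤ 1)]
    rfl
  set vis0 := (List.replicate N false).set 1 true with hvis0
  have hlen0 : vis0.length = N := by rw [hvis0, List.length_set, List.length_replicate]
  have hrepget : (List.replicate N false)[(1 : Nat)]? = some false := by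
    rw [List.getElem?_replicate, if_pos (by omega)]
  have hcnt := pvCountSet (List.replicate N false) 1 hrepget
  have hrepcount_t : (List.replicate N false).count true = 0 := by
    rw [List.count_replicate]; simp
  have hrepcount_f : (List.replicate N false).count false = N := by
    rw [List.count_replicate]; simp
  have hcnt0 : vis0.count true = 1 := by rw [hvis0, hcnt.1, hrepcount_t]
  have hcf0 : vis0.count false + 1 = N := by rw [hvis0, hcnt.2, hrepcount_f]
  have hmarked0 : ∀ v, pvMarked vis0 v ↔ v = 1 := by
    intro v
    unfold pvMarked
    rw [hvis0, List.getElem?_set]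
    constructor
    · rintro ⟨h0, hg⟩
      by_cases h1v : 1 = v.toNat
      · omega
      · rw [if_neg h1v, List.getElem?_replicate] at hg
        by_cases hvN : v.toNat < N
        · rw [if_pos hvN] at hg; cases hg
        · rw [if_neg hvN] at hg; cases hg
    · rintro rfl
      refine ⟨by norm_num, ?_⟩
      have ht : (1 : Int).toNat = 1 := rfl
      rw [ht, if_pos rfl, if_pos (by rw [List.length_replicate]; omega)]
  have hGE : ∀ v u, u ∈ G.getD v [] ↔ pvAdj E v u := fun v u =>
    pvMemBuildGraph i wires hrows v u
  have hEb : ∀ p ∈ E, 0 ≤ p.1 ∧ p.1 < (N : Int) ∧ 0 ≤ p.2 ∧ p.2 < (N : Int) := by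
    intro p hp
    have := pvEdges_bounds n i wires hPre p hp
    rw [hNcast]
    exact ⟨this.1, by omega, this.2.2.1, by omega⟩
  have hbfs : pvBfs G 1 (PySem.List.pyRepeat [false] (n + 1))
      = pvBfsLoop G (2 * N + 1) [1] vis0 (vis0.count true : Int) := by
    unfold pvBfs
    rw [hrep, hset]
    show pvBfsLoop G (2 * vis0.length + 1) [1] vis0 1 = _
    rw [hlen0, show ((vis0.count true : Nat) : Int) = 1 from by rw [hcnt0]; rfl]
  obtain ⟨visF, hF1, hF2, hF3, hF4, hF5⟩ :=
    pvBfsRun G E N hGE hEb (2 * N + 1) [1] vis0 hlen0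
      (by intro x hx; rcases List.mem_singleton.1 hx with rfl; exact (hmarked0 1).2 rfl)
      (by intro v hv hnv; exact absurd (List.mem_singleton.2 ((hmarked0 v).1 hv)) hnv)
      (by simp only [List.length_singleton]; omega)
  -- the B side: run the saturation loop
  set U := PySem.Set.ofList (1 :: (E.map Prod.fst ++ E.map Prod.snd)) with hU
  have hend : ∀ j ∈ PySem.List.pyRange 0 wires.length, j ≠ i →
      ∀ w a b, PySem.List.pyGet? wires j = some w → PySem.List.pyGet? w 0 = some a →
        PySem.List.pyGet? w 1 = some b → a ∈ U ∧ b ∈ U := by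
    intro j hj hji w a b hw ha hb
    have hab : (a, b) ∈ E := pvEdges_of_get i wires j w a b hj hji hw ha hb
    constructor
    · rw [hU, PySem.Set.mem_ofList]
      exact List.mem_cons_of_mem _ (List.mem_append.2 (Or.inl (List.mem_map.2 ⟨(a, b), hab, rfl⟩)))
    · rw [hU, PySem.Set.mem_ofList]
      exact List.mem_cons_of_mem _ (List.mem_append.2 (Or.inr (List.mem_map.2 ⟨(a, b), hab, rfl⟩)))
  have hElen : E.length ≤ wires.length := by
    rw [hE]
    unfold pvEdges
    rw [List.length_map]
    calc ((PySem.List.enumerate wires).filter _).length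
        ≤ (PySem.List.enumerate wires).length := List.length_filter_le _ _
      _ = wires.length := PySem.List.length_enumerate wires 0
  have hUlen : U.length < (2 * wires.length + 2) + (PySem.Set.ofList [1] : List Int).length := by
    have h1 : U.length ≤ (1 :: (E.map Prod.fst ++ E.map Prod.snd)).length :=
      PySem.Set.length_ofList_le _
    simp only [List.length_cons, List.length_append, List.length_map] at h1
    have h2 : (PySem.Set.ofList [1] : List Int).length = 1 := rfl
    omega
  obtain ⟨w1, w2, w3, w4⟩ := pvWhileRun wires i U hend (2 * wires.length + 2)
    (PySem.Set.ofList [1]) (PySem.Set.nodup_ofList _)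
    (by
      intro x hx
      rcases (PySem.Set.mem_ofList _ _).1 hx with hx
      rcases List.mem_singleton.1 hx with rfl
      rw [hU, PySem.Set.mem_ofList]
      exact List.mem_cons_self)
    hUlen
  set compF := pvWhile wires i (2 * wires.length + 2) (PySem.Set.ofList [1]) with hcompF
  have h1c : (1 : Int) ∈ compF :=
    w1 1 ((PySem.Set.mem_ofList _ _).2 List.mem_cons_self)
  -- the two results mark exactly the same vertices
  have hiff : ∀ v, pvMarked visF v ↔ v ∈ compF := by
    intro v
    constructor
    · refine hF5 (fun x => x ∈ compF) ?_ ?_ v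
      · intro p hp
        obtain ⟨j, w, hj, hji, hw, ha, hb⟩ := pvEdges_get i wires hrows p hp
        exact w3 j hj hji w p.1 p.2 hw ha hb
      · intro x hx
        rcases (hmarked0 x).1 hx with rfl
        exact h1c
    · refine w4 (pvMarked visF) ?_ ?_ v
      · intro j hj hji w a b hw ha hb
        have hab : (a, b) ∈ E := pvEdges_of_get i wires j w a b hj hji hw ha hb
        constructor
        · intro hma
          exact hF4 a b hma ((hGE a b).2 (Or.inl hab))
        · intro hmb
          exact hF4 b a hmb ((hGE b a).2 (Or.inr hab))
      · intro x hx
        rcases (PySem.Set.mem_ofList _ _).1 hx with hx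
        rcases List.mem_singleton.1 hx with rfl
        exact hF3 1 ((hmarked0 1).2 rfl)
  rw [hbfs, hF1]
  exact pvCount_eq visF compF w2 hiff

lemma pvMain (n : Int) (wires : List (List Int)) (h : Pre_solution n wires) :
    solution n wires = solution_alt n wires := by
  rcases h with ⟨hn0, hrows, hcase⟩
  cases wires with
  | nil =>
    unfold solution solution_alt
    have h0 : ((([] : List (List Int)).length : Nat) : Int) ≤ 0 := by simp
    rw [PySem.List.pyRange_one_eq_nil h0]
    rfl
  | cons w0 ws =>
    have hn : 1 ≤ n := by
      rcases hn0 with h | h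
      · cases h
      · exact h
    have hPer : ∀ i : Int,
        pvBfs (pvBuildGraph i (PySem.List.slice (w0 :: ws))) 1
          (PySem.List.pyRepeat [false] (n + 1))
        = PySem.Set.len (pvWhile (w0 :: ws) i (2 * (w0 :: ws).length + 2)
            (PySem.Set.ofList [1])) := by
      intro i
      rcases hcase with hbnd | h1f
      · exact pvPerI n (w0 :: ws) hn hrows hbnd i
      · exact pvPerI1 n (w0 :: ws) hn h1f i
    unfold solution solution_alt
    apply PySem.List.foldl_congr_mem
    intro acc i _
    show min acc
        (((pvBfs (pvBuildGraph i (PySem.List.slice (w0 :: ws))) 1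
            (PySem.List.pyRepeat [false] (n + 1)))
          - (n - pvBfs (pvBuildGraph i (PySem.List.slice (w0 :: ws))) 1
            (PySem.List.pyRepeat [false] (n + 1)))).natAbs : Int)
      = min acc ((2 * PySem.Set.len (pvWhile (w0 :: ws) i (2 * (w0 :: ws).length + 2)
          (PySem.Set.ofList [1])) - n).natAbs : Int)
    rw [hPer i]
    congr 1
    rw [show ∀ X : Int, X - (n - X) = 2 * X - n from fun X => by ring]

-- ===== VERDICT (by name: the statement is the Claim_ definition above) =====
theorem solution_spec : Claim_equal_solution := by
  intro n wires _ hpre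
  unfold Spec_solution
  exact pvMain n wires hpre
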